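-- pv_equiv track=rewrite | github.com/joilsonsr/simulador_roleta_com_grafico | simulador_rodadas_com_graficos.py | calcular_atrasos
-- ===== SOURCE A (Python) =====
-- COLUNA_1 = {1, 4, 7, 10, 13, 16, 19, 22, 25, 28, 31, 34}
--
-- COLUNA_2 = {2, 5, 8, 11, 14, 17, 20, 23, 26, 29, 32, 35}
--
-- COLUNA_3 = {3, 6, 9, 12, 15, 18, 21, 24, 27, 30, 33, 36}
--
-- def calcular_atrasos(resultados):
--     atrasos = {"coluna_1": 0, "coluna_2": 0, "coluna_3": 0}
--     ultima_coluna = {"coluna_1": -len(resultados), "coluna_2": -len(resultados), "coluna_3": -len(resultados)}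
--
--     for i, (numero, _) in enumerate(resultados):
--         if numero in COLUNA_1:
--             ultima_coluna["coluna_1"] = i
--         elif numero in COLUNA_2:
--             ultima_coluna["coluna_2"] = i
--         elif numero in COLUNA_3:
--             ultima_coluna["coluna_3"] = i
--
--     total_rodadas = len(resultados)
--     for coluna, ultima_aparicao in ultima_coluna.items():
--         atrasos[coluna] = total_rodadas - ultima_aparicao
--     return atrasos
-- ===== SOURCE B (Python) =====
-- COLUNA_1 = {1, 4, 7, 10, 13, 16, 19, 22, 25, 28, 31, 34}
--
-- COLUNA_2 = {2, 5, 8, 11, 14, 17, 20, 23, 26, 29, 32, 35}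
--
-- COLUNA_3 = {3, 6, 9, 12, 15, 18, 21, 24, 27, 30, 33, 36}
--
-- def calcular_atrasos(resultados):
--     """Rounds since each column's last appearance; a column absent from the
--     whole window counts as last seen n rounds before the window started."""
--     n = len(resultados)
--     colunas = {"coluna_1": COLUNA_1, "coluna_2": COLUNA_2, "coluna_3": COLUNA_3}
--     return {nome: n - max((i for i, (numero, _) in enumerate(resultados)
--                            if numero in conjunto), default=-n)
--             for nome, conjunto in colunas.items()}
-- ===== Notes on version B (the rewrite author's own statement) =====
-- stated objective: alternative
-- what changed: Columns become the outer structure: B is a dict comprehension that, per column, takes the max hit index over a filtered enumerate (default -n) and subtracts it from n, instead of A's single forward pass maintaining all three last-occurrence indices in a mutable dict and a second loop writing the delays.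
import Mathlib
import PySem

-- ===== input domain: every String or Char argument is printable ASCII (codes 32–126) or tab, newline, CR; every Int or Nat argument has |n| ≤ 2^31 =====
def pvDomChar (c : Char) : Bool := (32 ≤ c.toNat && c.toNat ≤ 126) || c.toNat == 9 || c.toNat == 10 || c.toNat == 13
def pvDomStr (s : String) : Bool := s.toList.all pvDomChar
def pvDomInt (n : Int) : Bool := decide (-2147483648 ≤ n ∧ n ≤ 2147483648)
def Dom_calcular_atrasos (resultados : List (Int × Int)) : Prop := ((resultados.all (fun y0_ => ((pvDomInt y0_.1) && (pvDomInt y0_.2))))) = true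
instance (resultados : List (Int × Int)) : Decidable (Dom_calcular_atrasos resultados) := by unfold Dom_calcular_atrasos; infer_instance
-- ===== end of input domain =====

-- B replaces A's single forward pass (a state machine maintaining all three
-- last-occurrence indices) by a dict comprehension taking, per column, the max
-- hit index over enumerate; objective: alternative decomposition, same cost.

-- ===== PORT A =====
-- membership in the Python sets COLUNA_1/2/3
def inCol1 (x : Int) : Bool := [1, 4, 7, 10, 13, 16, 19, 22, 25, 28, 31, 34].contains x
def inCol2 (x : Int) : Bool := [2, 5, 8, 11, 14, 17, 20, 23, 26, 29, 32, 35].contains x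
def inCol3 (x : Int) : Bool := [3, 6, 9, 12, 15, 18, 21, 24, 27, 30, 33, 36].contains x

-- state (i, c1, c2, c3): enumerate's counter and ultima_coluna's three entries
def calcular_atrasos (resultados : List (Int × Int)) : List (String × Int) :=
  let n : Int := resultados.length
  let u :=
    resultados.foldl
      (fun (st : Int × Int × Int × Int) (par : Int × Int) =>
        let i := st.1
        let numero := par.1
        if inCol1 numero then (i + 1, i, st.2.2.1, st.2.2.2)
        else if inCol2 numero then (i + 1, st.2.1, i, st.2.2.2)
        else if inCol3 numero then (i + 1, st.2.1, st.2.2.1, i)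
        else (i + 1, st.2.1, st.2.2.1, st.2.2.2))
      (0, -n, -n, -n)
  [("coluna_1", n - u.2.1), ("coluna_2", n - u.2.2.1), ("coluna_3", n - u.2.2.2)]

-- ===== PORT B =====
-- the generator 'i for i, (numero, _) in enumerate(resultados) if numero in conjunto'
def pvHitIdxs (p : Int → Bool) (resultados : List (Int × Int)) : List Int :=
  ((PySem.List.enumerate resultados).filter (fun q => p q.2.1)).map (·.1)

def calcular_atrasos_alt (resultados : List (Int × Int)) : List (String × Int) :=
  let n : Int := resultados.length
  [("coluna_1", inCol1), ("coluna_2", inCol2), ("coluna_3", inCol3)].map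
    (fun c => (c.1, n - PySem.List.maxD (pvHitIdxs c.2 resultados) (fun x => x) (-n)))

-- ===== PRECONDITION & SPEC =====
def Spec_calcular_atrasos (resultados : List (Int × Int)) (out : List (String × Int)) : Prop := out = calcular_atrasos_alt resultados
instance (resultados : List (Int × Int)) (out : List (String × Int)) : Decidable (Spec_calcular_atrasos resultados out) := by unfold Spec_calcular_atrasos; infer_instance

-- ===== CLAIM (what is proved, stated in full; the proofs are below) =====
def Claim_equal_calcular_atrasos : Prop := ∀ (resultados : List (Int × Int)), Dom_calcular_atrasos resultados → Spec_calcular_atrasos resultados (calcular_atrasos resultados)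

-- ===== LEMMAS AND PROOFS =====

-- scalar version of one component of A's fold
def scal (p : Int → Bool) (i0 c : Int) : List (Int × Int) → Int
  | [] => c
  | x :: xs => scal p (i0 + 1) (if p x.1 then i0 else c) xs

-- the columns are pairwise disjoint sets
theorem col2_not1 (x : Int) (h : inCol2 x = true) : inCol1 x = false := by
  simp [inCol1, inCol2] at *; omega

theorem col3_not12 (x : Int) (h : inCol3 x = true) : inCol1 x = false ∧ inCol2 x = false := by
  simp [inCol1, inCol2, inCol3] at *; omega

theorem foldA_decompose (xs : List (Int × Int)) :
    ∀ i0 c1 c2 c3,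
      xs.foldl
        (fun (st : Int × Int × Int × Int) (par : Int × Int) =>
          let i := st.1
          let numero := par.1
          if inCol1 numero then (i + 1, i, st.2.2.1, st.2.2.2)
          else if inCol2 numero then (i + 1, st.2.1, i, st.2.2.2)
          else if inCol3 numero then (i + 1, st.2.1, st.2.2.1, i)
          else (i + 1, st.2.1, st.2.2.1, st.2.2.2))
        (i0, c1, c2, c3)
      = (i0 + xs.length, scal inCol1 i0 c1 xs, scal inCol2 i0 c2 xs, scal inCol3 i0 c3 xs) := by
  induction xs with
  | nil => intro i0 c1 c2 c3; simp [scal]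
  | cons x xs ih =>
      intro i0 c1 c2 c3
      by_cases h1 : inCol1 x.1 = true
      · have h2 : inCol2 x.1 = false := by
          by_cases h : inCol2 x.1 = true
          · exact absurd h1 (by simp [col2_not1 x.1 h])
          · simpa using h
        have h3 : inCol3 x.1 = false := by
          by_cases h : inCol3 x.1 = true
          · exact absurd h1 (by simp [(col3_not12 x.1 h).1])
          · simpa using h
        simp [scal, h1, h2, h3, ih]
        ring
      · replace h1 : inCol1 x.1 = false := by simpa using h1
        by_cases h2 : inCol2 x.1 = true
        · have h3 : inCol3 x.1 = false := by
            by_cases h : inCol3 x.1 = true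
            · exact absurd h2 (by simp [(col3_not12 x.1 h).2])
            · simpa using h
          simp [scal, h1, h2, h3, ih]
          ring
        · replace h2 : inCol2 x.1 = false := by simpa using h2
          by_cases h3 : inCol3 x.1 = true
          · simp [scal, h1, h2, h3, ih]
            push_cast; ring
          · replace h3 : inCol3 x.1 = false := by simpa using h3
            simp [scal, h1, h2, h3, ih]
            ring

-- A's last-hit accumulator is a running max over the hit indices (the indices
-- handed to it are strictly increasing and start at i0 ≥ c)
theorem scal_eq_foldl_max (p : Int → Bool) (xs : List (Int × Int)) :
    ∀ i0 c, c ≤ i0 →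
      scal p i0 c xs
        = List.foldl max c (((PySem.List.enumerate xs i0).filter (fun q => p q.2.1)).map (·.1)) := by
  induction xs with
  | nil => intro i0 c _; simp [scal, PySem.List.enumerate_nil]
  | cons x xs ih =>
      intro i0 c hc
      rw [PySem.List.enumerate_cons]
      by_cases hp : p x.1
      · simp only [scal, hp, if_pos, List.filter_cons, List.map_cons, List.foldl_cons]
        rw [ih (i0 + 1) i0 (by omega), max_eq_right hc]
      · replace hp : p x.1 = false := by simpa using hp
        simp only [scal, hp, if_neg, Bool.false_eq_true, not_false_iff, List.filter_cons]
        rw [ih (i0 + 1) c (by omega)]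

-- every hit index (start 0) is nonnegative
theorem hitIdxs_nonneg (p : Int → Bool) (xs : List (Int × Int)) :
    ∀ j ∈ pvHitIdxs p xs, 0 ≤ j := by
  intro j hj
  unfold pvHitIdxs at hj
  obtain ⟨q, hq, rfl⟩ := List.mem_map.mp hj
  obtain ⟨k, hk, rfl⟩ := (PySem.List.mem_enumerate_iff _ _ _).mp (List.mem_filter.mp hq).1
  simp

-- per column: A's component equals B's max-with-default
theorem column_agree (p : Int → Bool) (xs : List (Int × Int)) :
    scal p 0 (-(xs.length : Int)) xs
      = PySem.List.maxD (pvHitIdxs p xs) (fun x => x) (-(xs.length : Int)) := by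
  rw [scal_eq_foldl_max p xs 0 (-(xs.length : Int)) (by omega)]
  show List.foldl max (-(xs.length : Int)) (pvHitIdxs p xs) = _
  cases h : pvHitIdxs p xs with
  | nil => rfl
  | cons j t =>
      have hj : 0 ≤ j := hitIdxs_nonneg p xs j (h ▸ List.mem_cons_self ..)
      simp only [PySem.List.maxD, PySem.List.max?_id_cons]
      simp only [List.foldl_cons, Option.getD_some]
      congr 1
      have hle : (-(xs.length : Int)) ≤ j := by omega
      exact max_eq_right hle

-- ===== VERDICT (by name: the statement is the Claim_ definition above) =====
theorem calcular_atrasos_spec : Claim_equal_calcular_atrasos := by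
  intro xs _
  show calcular_atrasos xs = calcular_atrasos_alt xs
  unfold calcular_atrasos calcular_atrasos_alt
  simp only [foldA_decompose, List.map_cons, List.map_nil]
  rw [column_agree inCol1, column_agree inCol2, column_agree inCol3]
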